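-- pv_equiv track=rewrite | github.com/kelvincaoyx/APS106-Notes | week8/answer/1.py | sum_with_loops
-- ===== SOURCE A (Python) =====
-- def sum_with_loops(matrix):
--     ''' (2D-list) -> int
--     Returns the sum of the elements in the border of the size X size matrix.
--     First and last rows and columns.
--     '''
--     size = len(matrix)
--     s = 0
--     for row in range(size):
--         if row == 0 or row == size - 1:
--             # sum whole row for first and last rows
--             for value in matrix[row]:
--                 s += value
--         else:
--             # sum first and last entries for middle rows
--             s += matrix[row][0]
--             s += matrix[row][size - 1]
--
--     return s
-- ===== SOURCE B (Python) =====
-- def sum_with_loops(matrix):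
--     ''' (2D-list) -> int
--     Border sum as whole-matrix total minus the interior submatrix sum.
--     '''
--     size = len(matrix)
--     total = sum(sum(row) for row in matrix)
--     interior = sum(sum(matrix[i][1:size-1]) for i in range(1, size-1))
--     return total - interior
-- ===== Notes on version B (the rewrite author's own statement) =====
-- stated objective: alternative
-- what changed: Replaces the row-by-row branching loop (full sum for first/last row, two end entries for middle rows) by total-minus-interior: sum every element, then subtract the interior submatrix rows 1..size-2, columns 1..size-2.
-- outside the precondition, e.g. on sum_with_loops([[1], [2, 3, 4, 9], [5]]): A returns 12, B returns 21
import Mathlib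
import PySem

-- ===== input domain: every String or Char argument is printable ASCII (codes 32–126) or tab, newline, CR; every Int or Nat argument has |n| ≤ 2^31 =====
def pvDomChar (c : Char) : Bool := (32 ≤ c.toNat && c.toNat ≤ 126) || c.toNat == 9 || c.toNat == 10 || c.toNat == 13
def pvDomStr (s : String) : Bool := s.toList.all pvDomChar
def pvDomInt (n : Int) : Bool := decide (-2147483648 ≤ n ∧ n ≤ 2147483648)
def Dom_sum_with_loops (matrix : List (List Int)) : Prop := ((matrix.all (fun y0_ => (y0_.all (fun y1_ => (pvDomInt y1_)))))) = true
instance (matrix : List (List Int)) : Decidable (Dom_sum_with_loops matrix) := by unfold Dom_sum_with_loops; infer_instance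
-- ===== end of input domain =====

-- B computes the border sum as the whole-matrix total minus the interior-submatrix sum (a different
-- decomposition of the same quadratic work); equivalence is proved on the size×size domain (Pre_ below).

-- ===== PORT A =====
def sum_with_loops (matrix : List (List Int)) : Int :=
  let size : Int := PySem.List.len matrix
  (PySem.List.pyRange 0 size 1).foldl (fun s row =>
    if row = 0 ∨ row = size - 1 then
      (PySem.List.pyGetD matrix row []).foldl (fun s value => s + value) s
    else
      s + PySem.List.pyGetD (PySem.List.pyGetD matrix row []) 0 0
        + PySem.List.pyGetD (PySem.List.pyGetD matrix row []) (size - 1) 0) 0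

-- ===== PORT B =====
def sum_with_loops_alt (matrix : List (List Int)) : Int :=
  let size : Int := PySem.List.len matrix
  let total : Int := (matrix.map (fun row => row.sum)).sum
  let interior : Int :=
    ((PySem.List.pyRange 1 (size - 1) 1).map
      (fun i => (PySem.List.slice (PySem.List.pyGetD matrix i []) (some 1) (some (size - 1))).sum)).sum
  total - interior

-- ===== PRECONDITION & SPEC =====
-- Pre_ requires every MIDDLE row (rows 1..size-2) to have exactly `size` entries — the documented
-- "size X size" domain: on shorter middle rows A raises IndexError, and on longer middle rows A's
-- value (silently ignoring the columns beyond index size-1) is an artefact of indexing columns by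
-- the row count, which B's total-minus-interior does not reproduce.
def Pre_sum_with_loops (matrix : List (List Int)) : Prop :=
  ∀ r ∈ (matrix.drop 1).dropLast, r.length = matrix.length
instance (matrix : List (List Int)) : Decidable (Pre_sum_with_loops matrix) := by
  unfold Pre_sum_with_loops; infer_instance
def pvWitness_sum_with_loops : List (List Int) := [[1, 2, 3], [4, 5, 6], [7, 8, 9]]
def Spec_sum_with_loops (matrix : List (List Int)) (out : Int) : Prop := out = sum_with_loops_alt matrix
instance (matrix : List (List Int)) (out : Int) : Decidable (Spec_sum_with_loops matrix out) := by unfold Spec_sum_with_loops; infer_instance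

-- ===== CLAIM (what is proved, stated in full; the proofs are below) =====
def Claim_equal_sum_with_loops : Prop := ∀ (matrix : List (List Int)), Dom_sum_with_loops matrix → Pre_sum_with_loops matrix → Spec_sum_with_loops matrix (sum_with_loops matrix)

-- ===== LEMMAS AND PROOFS =====

theorem pv_row_split (r : List Int) (N : Nat) (hr : r.length = N) (h2 : 2 ≤ N) :
    r.sum = PySem.List.pyGetD r 0 0
      + (PySem.List.slice r (some 1) (some ((N : Int) - 1))).sum
      + PySem.List.pyGetD r ((N : Int) - 1) 0 := by
  match r with
  | [] => exfalso; simp only [List.length_nil] at hr; omega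
  | a :: t =>
    have hlen : t.length + 1 = N := by simpa using hr
    have ht : t ≠ [] := List.ne_nil_of_length_pos (by omega)
    have hslice : PySem.List.slice (a :: t) (some 1) (some ((N : Int) - 1)) = t.dropLast := by
      rw [PySem.List.slice_of_nonneg (a :: t) (by omega) (by omega)
        (by simp only [List.length_cons]; omega) (by simp only [List.length_cons]; omega)]
      simp only [Int.toNat_one, List.drop_one, List.tail_cons]
      rw [List.dropLast_eq_take]
      congr 1
      omega
    have hlast : PySem.List.pyGetD (a :: t) ((N : Int) - 1) 0 = t.getLast ht := by
      rw [PySem.List.pyGetD_eq_getElem (a :: t) 0 (by omega)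
        (by simp only [List.length_cons]; push_cast; omega)]
      simp only [show ((N : Int) - 1).toNat = (t.length - 1) + 1 from by omega,
        List.getElem_cons_succ, List.getLast_eq_getElem]
    rw [hslice, hlast, PySem.List.pyGetD_zero_cons]
    have hsp := List.dropLast_append_getLast ht
    calc (a :: t).sum = a + t.sum := by simp
      _ = a + (t.dropLast ++ [t.getLast ht]).sum := by rw [hsp]
      _ = a + t.dropLast.sum + t.getLast ht := by simp; ring

theorem pv_main (r0 rl : List Int) (mid : List (List Int))
    (hpre : ∀ r ∈ mid, r.length = mid.length + 2) :
    sum_with_loops ((r0 :: mid) ++ [rl]) = sum_with_loops_alt ((r0 :: mid) ++ [rl]) := by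
  have hlen : ((r0 :: mid) ++ [rl]).length = mid.length + 2 := by simp
  simp only [sum_with_loops, sum_with_loops_alt, PySem.List.len_eq, hlen]
  have hget0 : PySem.List.pyGetD ((r0 :: mid) ++ [rl]) 0 [] = r0 := by
    rw [List.cons_append, PySem.List.pyGetD_zero_cons]
  have hgetlast : PySem.List.pyGetD ((r0 :: mid) ++ [rl]) (((mid.length + 2 : Nat) : Int) - 1) [] = rl := by
    have h := PySem.List.pyGet?_append_length (r0 :: mid) [] rl
    have hc : (((r0 :: mid).length : Nat) : Int) = ((mid.length + 2 : Nat) : Int) - 1 := by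
      simp only [List.length_cons]; push_cast; ring
    rw [hc] at h
    simp only [PySem.List.pyGetD]
    rw [h]
    rfl
  have hmap : (PySem.List.pyRange 1 (((mid.length + 2 : Nat) : Int) - 1) 1).map
      (fun i => PySem.List.pyGetD ((r0 :: mid) ++ [rl]) i []) = mid := by
    have h1 := PySem.List.map_pyGetD_pyRange (r0 :: mid) (d := ([] : List Int)) (a := 1) (by omega)
    have hc : PySem.List.len (r0 :: mid) = ((mid.length + 2 : Nat) : Int) - 1 := by
      simp only [PySem.List.len_eq, List.length_cons]; push_cast; ring
    rw [hc] at h1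
    simp only [Int.toNat_one, List.drop_one, List.tail_cons] at h1
    refine Eq.trans (List.map_congr_left ?_) h1
    intro i hi
    rw [PySem.List.mem_pyRange_one] at hi
    have hi1 : 0 ≤ i := by omega
    have hi2 : i < ((r0 :: mid).length : Int) := by
      simp only [List.length_cons]; push_cast; omega
    have hi3 : i < (((r0 :: mid) ++ [rl]).length : Int) := by
      simp only [List.length_append, List.length_cons, List.length_nil]; push_cast; omega
    rw [PySem.List.pyGetD_eq_getElem _ _ hi1 hi3, PySem.List.pyGetD_eq_getElem _ _ hi1 hi2]
    exact List.getElem_append_left (by simp at hi2 ⊢; omega)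
  have hr1 : PySem.List.pyRange 0 ((mid.length + 2 : Nat) : Int) 1
      = 0 :: PySem.List.pyRange 1 ((mid.length + 2 : Nat) : Int) 1 :=
    PySem.List.pyRange_one_cons (by push_cast; omega)
  have hsing : PySem.List.pyRange (((mid.length + 2 : Nat) : Int) - 1) ((mid.length + 2 : Nat) : Int) 1
      = [((mid.length + 2 : Nat) : Int) - 1] := by
    have h := PySem.List.pyRange_one_singleton (((mid.length + 2 : Nat) : Int) - 1)
    rw [sub_add_cancel] at h
    exact h
  have hr2 : PySem.List.pyRange 1 ((mid.length + 2 : Nat) : Int) 1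
      = PySem.List.pyRange 1 (((mid.length + 2 : Nat) : Int) - 1) 1
        ++ [((mid.length + 2 : Nat) : Int) - 1] := by
    rw [PySem.List.pyRange_one_append 1 (((mid.length + 2 : Nat) : Int) - 1)
      ((mid.length + 2 : Nat) : Int) (by push_cast; omega) (by omega), hsing]
  have hmidfold : ∀ init : Int,
      List.foldl (fun s row =>
        if row = 0 ∨ row = ((mid.length + 2 : Nat) : Int) - 1 then
          (PySem.List.pyGetD ((r0 :: mid) ++ [rl]) row []).foldl (fun s value => s + value) s
        else
          s + PySem.List.pyGetD (PySem.List.pyGetD ((r0 :: mid) ++ [rl]) row []) 0 0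
            + PySem.List.pyGetD (PySem.List.pyGetD ((r0 :: mid) ++ [rl]) row [])
              (((mid.length + 2 : Nat) : Int) - 1) 0) init
        (PySem.List.pyRange 1 (((mid.length + 2 : Nat) : Int) - 1) 1)
      = init + ((PySem.List.pyRange 1 (((mid.length + 2 : Nat) : Int) - 1) 1).map
          (fun i => PySem.List.pyGetD (PySem.List.pyGetD ((r0 :: mid) ++ [rl]) i []) 0 0
            + PySem.List.pyGetD (PySem.List.pyGetD ((r0 :: mid) ++ [rl]) i [])
              (((mid.length + 2 : Nat) : Int) - 1) 0)).sum := by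
    intro init
    rw [PySem.List.foldl_congr_mem _ _
      (fun s i => s + (PySem.List.pyGetD (PySem.List.pyGetD ((r0 :: mid) ++ [rl]) i []) 0 0
        + PySem.List.pyGetD (PySem.List.pyGetD ((r0 :: mid) ++ [rl]) i [])
          (((mid.length + 2 : Nat) : Int) - 1) 0)) init
      (by
        intro acc i hi
        rw [PySem.List.mem_pyRange_one] at hi
        rw [if_neg (by omega)]
        ring)]
    exact PySem.List.foldl_add _ _ _
  rw [hr1, hr2, List.foldl_cons, List.foldl_append]
  rw [if_pos (Or.inl rfl), hget0, hmidfold]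
  simp only [List.foldl_cons, List.foldl_nil, or_true, if_true]
  rw [hgetlast]
  rw [PySem.List.foldl_add, PySem.List.foldl_add]
  rw [show (fun i => PySem.List.pyGetD (PySem.List.pyGetD ((r0 :: mid) ++ [rl]) i []) 0 0
      + PySem.List.pyGetD (PySem.List.pyGetD ((r0 :: mid) ++ [rl]) i [])
        (((mid.length + 2 : Nat) : Int) - 1) 0)
    = (fun r => PySem.List.pyGetD r 0 0
        + PySem.List.pyGetD r (((mid.length + 2 : Nat) : Int) - 1) 0)
      ∘ (fun i => PySem.List.pyGetD ((r0 :: mid) ++ [rl]) i []) from rfl,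
    ← List.map_map, hmap]
  rw [show (fun i => (PySem.List.slice (PySem.List.pyGetD ((r0 :: mid) ++ [rl]) i [])
        (some 1) (some (((mid.length + 2 : Nat) : Int) - 1))).sum)
    = (fun r => (PySem.List.slice r (some 1) (some (((mid.length + 2 : Nat) : Int) - 1))).sum)
      ∘ (fun i => PySem.List.pyGetD ((r0 :: mid) ++ [rl]) i []) from rfl,
    ← List.map_map, hmap]
  simp only [List.cons_append, List.map_cons, List.map_append, List.sum_append,
    List.sum_cons]
  have hrow : mid.map (fun r => r.sum)
      = mid.map (fun r => (PySem.List.pyGetD r 0 0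
          + (PySem.List.slice r (some 1) (some (((mid.length + 2 : Nat) : Int) - 1))).sum)
          + PySem.List.pyGetD r (((mid.length + 2 : Nat) : Int) - 1) 0) := by
    apply List.map_congr_left
    intro r hr
    have h := pv_row_split r (mid.length + 2) (hpre r hr) (by omega)
    rw [h]
  rw [hrow, PySem.List.sum_map_add_int, PySem.List.sum_map_add_int]
  simp only [List.map_id', List.map_nil, List.sum_nil]
  rw [PySem.List.sum_map_add_int]
  ring

-- ===== VERDICT (by name: the statement is the Claim_ definition above) =====
theorem sum_with_loops_spec : Claim_equal_sum_with_loops := by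
  intro matrix _hdom hpre
  unfold Spec_sum_with_loops
  match matrix, hpre with
  | [], _ => rfl
  | [r0], _ =>
    have h01 : PySem.List.pyRange 0 1 1 = [0] := by
      simpa using PySem.List.pyRange_one_singleton 0
    have h10 : PySem.List.pyRange 1 0 1 = [] := PySem.List.pyRange_one_eq_nil (by omega)
    simp [sum_with_loops, sum_with_loops_alt, h01, h10, PySem.List.pyGetD_zero_cons]
    simpa using PySem.List.foldl_add r0 (fun x => x) 0
  | r0 :: s0 :: rest0, hpre =>
    have hne : s0 :: rest0 ≠ ([] : List (List Int)) := by simp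
    have hsp := List.dropLast_append_getLast hne
    have hpre' : ∀ r ∈ (s0 :: rest0).dropLast,
        r.length = ((s0 :: rest0).dropLast).length + 2 := by
      intro r hr
      have h := hpre r (by simpa using hr)
      simpa using h
    have := pv_main r0 ((s0 :: rest0).getLast hne) ((s0 :: rest0).dropLast) hpre'
    rw [List.cons_append, hsp] at this
    exact this
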